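-- pv_equiv track=rewrite | github.com/pypi-data/pypi-mirror-371 | packages/urarovite/urarovite-1.3.0-py3-none-any.whl/urarovite/validators/sheet_accessibility.py | _detect_url_columns
-- ===== SOURCE A (Python) =====
-- from typing import Any, Dict, List, Union
--
-- def _detect_url_columns(data: List[List[Any]]) -> List[int]:
--     """Auto-detect columns containing Google Sheets URLs."""
--     url_columns = []
--
--     if not data:
--         return url_columns
--
--     # Check first few rows for URLs
--     sample_rows = data[: min(5, len(data))]
--
--     for col_idx in range(len(data[0]) if data[0] else 0):
--         contains_urls = False
--
--         for row in sample_rows: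
--             if col_idx < len(row) and row[col_idx]:
--                 cell_value = str(row[col_idx])
--                 if "docs.google.com/spreadsheets" in cell_value:
--                     contains_urls = True
--                     break
--
--         if contains_urls:
--             url_columns.append(col_idx + 1)  # Convert to 1-based
--
--     return url_columns
-- ===== SOURCE B (Python) =====
-- def _detect_url_columns(data):
--     """Auto-detect columns containing Google Sheets URLs (row-major scan into a set)."""
--     if not data or not data[0]:
--         return []
--     ncols = len(data[0])
--     found = set()
--     for row in data[:5]:
--         for col_idx, cell in enumerate(row[:ncols]):
--             if cell and "docs.google.com/spreadsheets" in str(cell):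
--                 found.add(col_idx)
--     return [c + 1 for c in sorted(found)]
-- ===== Notes on version B (the rewrite author's own statement) =====
-- stated objective: alternative
-- what changed: Replaces A's column-major scan with a per-column early-break inner loop by a single row-major pass over the sample rows that accumulates found column indices in a set, then returns them sorted and 1-based.
import Mathlib
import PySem

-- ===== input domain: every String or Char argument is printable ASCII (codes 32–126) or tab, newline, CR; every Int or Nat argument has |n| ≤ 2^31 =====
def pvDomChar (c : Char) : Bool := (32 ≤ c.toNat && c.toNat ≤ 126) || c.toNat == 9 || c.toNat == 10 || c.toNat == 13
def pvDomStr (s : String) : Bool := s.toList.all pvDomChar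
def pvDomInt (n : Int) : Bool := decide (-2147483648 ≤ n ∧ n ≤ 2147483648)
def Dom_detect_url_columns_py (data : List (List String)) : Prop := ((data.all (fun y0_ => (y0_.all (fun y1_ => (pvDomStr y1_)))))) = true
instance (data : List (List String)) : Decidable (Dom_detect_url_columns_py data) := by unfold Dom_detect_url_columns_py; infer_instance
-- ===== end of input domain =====

-- B replaces A's column-major scan (with a per-column early break) by one row-major pass
-- collecting hit columns in a set, sorted 1-based at the end; objective: alternative decomposition.

-- ===== PORT A =====
-- inner 'for row in sample_rows: … break' of A, one column at a time
def pvUrlHitA : List (List String) → Nat → Bool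
  | [], _ => false
  | row :: rest, col =>
    if col < row.length && (row.getD col "" != "") then
      if PySem.Str.isIn "docs.google.com/spreadsheets" (row.getD col "") then true
      else pvUrlHitA rest col
    else pvUrlHitA rest col

def detect_url_columns_py (data : List (List String)) : List Int :=
  match data with
  | [] => []
  | d0 :: _ =>
    let sample := PySem.List.slice data none (some ((min 5 data.length : Nat) : Int))
    let ncols := if d0 = [] then 0 else d0.length
    (List.range ncols).foldl
      (fun acc c => if pvUrlHitA sample c then acc ++ [(c : Int) + 1] else acc) []

-- ===== PORT B =====
def pvCellHit (cell : String) : Bool :=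
  cell != "" && PySem.Str.isIn "docs.google.com/spreadsheets" cell

def detect_url_columns_py_alt (data : List (List String)) : List Int :=
  match data with
  | [] => []
  | d0 :: _ =>
    if d0 = [] then []
    else
      let ncols := d0.length
      let found : PySem.Set Int :=
        (PySem.List.slice data none (some 5)).foldl
          (fun s row =>
            (PySem.List.enumerate (PySem.List.slice row none (some (ncols : Int))) 0).foldl
              (fun s p => if pvCellHit p.2 then PySem.Set.add s p.1 else s) s)
          PySem.Set.empty
      (PySem.List.sorted found (fun x => x) false).map (fun c => c + 1)

-- ===== PRECONDITION & SPEC =====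
def Spec_detect_url_columns_py (data : List (List String)) (out : List Int) : Prop := out = detect_url_columns_py_alt data
instance (data : List (List String)) (out : List Int) : Decidable (Spec_detect_url_columns_py data out) := by unfold Spec_detect_url_columns_py; infer_instance

-- ===== CLAIM (what is proved, stated in full; the proofs are below) =====
def Claim_equal_detect_url_columns_py : Prop := ∀ (data : List (List String)), Dom_detect_url_columns_py data → Spec_detect_url_columns_py data (detect_url_columns_py data)

-- ===== LEMMAS AND PROOFS =====
def pvColB (sample : List (List String)) (c : Nat) : Bool :=
  sample.any (fun row => decide (c < row.length) && pvCellHit (row.getD c ""))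

lemma pvUrlHitA_eq (sample : List (List String)) (c : Nat) :
    pvUrlHitA sample c = pvColB sample c := by
  induction sample with
  | nil => rfl
  | cons row rest ih =>
    rw [pvUrlHitA, ih]
    rcases Nat.lt_or_ge c row.length with h1 | h1
    · have hv : row.getD c "" = row[c] := List.getD_eq_getElem row "" h1
      rw [hv]
      by_cases h2 : row[c] = ""
      · simp [pvColB, pvCellHit, h1, h2]
      · have hb : (row[c] != "") = true := bne_iff_ne.mpr h2
        simp [pvColB, pvCellHit, h1, hb]
    · simp [pvColB, pvCellHit, Nat.not_lt.mpr h1]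

lemma pv_mem_inner (l : List (Int × String)) (s : PySem.Set Int) (x : Int) :
    x ∈ l.foldl (fun s p => if pvCellHit p.2 then PySem.Set.add s p.1 else s) s ↔
      x ∈ s ∨ ∃ p ∈ l, pvCellHit p.2 ∧ x = p.1 := by
  induction l generalizing s with
  | nil => simp
  | cons p rest ih =>
    simp only [List.foldl_cons, ih]
    by_cases h : pvCellHit p.2 = true <;>
      simp [h, PySem.Set.mem_add] <;> tauto

lemma pv_nodup_inner (l : List (Int × String)) (s : PySem.Set Int) (hs : s.Nodup) :
    (l.foldl (fun s p => if pvCellHit p.2 then PySem.Set.add s p.1 else s) s).Nodup := by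
  induction l generalizing s with
  | nil => exact hs
  | cons p rest ih =>
    simp only [List.foldl_cons]
    by_cases h : pvCellHit p.2 = true
    · simpa [h] using ih _ (PySem.Set.nodup_add _ _ hs)
    · simpa [h] using ih _ hs

lemma pv_mem_outer (sample : List (List String)) (ncols : Nat) (s : PySem.Set Int) (x : Int) :
    x ∈ sample.foldl
        (fun s row =>
          (PySem.List.enumerate (PySem.List.slice row none (some (ncols : Int))) 0).foldl
            (fun s p => if pvCellHit p.2 then PySem.Set.add s p.1 else s) s) s ↔
      x ∈ s ∨ ∃ row ∈ sample, ∃ k : Nat, k < row.length ∧ k < ncols ∧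
        pvCellHit (row.getD k "") ∧ x = (k : Int) := by
  induction sample generalizing s with
  | nil => simp
  | cons row rest ih =>
    rw [List.foldl_cons, ih, pv_mem_inner]
    simp only [PySem.List.slice_to_natCast, PySem.List.mem_enumerate_iff, List.mem_cons]
    constructor
    · rintro (⟨hx | ⟨p, ⟨k, hk, rfl⟩, hhit, rfl⟩⟩ | ⟨r, hr, k, h1, h2, hhit, rfl⟩)
      · exact Or.inl hx
      · refine Or.inr ⟨row, Or.inl rfl, k, ?_, ?_, ?_, by simp⟩
        · have := hk; simp [List.length_take] at this; omega
        · have := hk; simp [List.length_take] at this; omega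
        · have hk' : k < row.length := by have := hk; simp [List.length_take] at this; omega
          have hkn : k < ncols := by have := hk; simp [List.length_take] at this; omega
          simpa [List.getElem_take, List.getD_eq_getElem?_getD, List.getElem?_eq_getElem hk'] using hhit
      · exact Or.inr ⟨r, Or.inr hr, k, h1, h2, hhit, rfl⟩
    · rintro (hx | ⟨r, (rfl | hr), k, h1, h2, hhit, rfl⟩)
      · exact Or.inl (Or.inl hx)
      · refine Or.inl (Or.inr ⟨((k : Int), r.getD k ""), ⟨k, ?_, ?_⟩, hhit, rfl⟩)
        · simp [List.length_take]; omega
        · have : (r.take ncols)[k]'(by simp [List.length_take]; omega) = r[k] := List.getElem_take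
          simp [this, List.getD_eq_getElem?_getD, List.getElem?_eq_getElem h1]
      · exact Or.inr ⟨r, hr, k, h1, h2, hhit, rfl⟩

lemma pv_nodup_outer (sample : List (List String)) (ncols : Nat) (s : PySem.Set Int) (hs : s.Nodup) :
    (sample.foldl
        (fun s row =>
          (PySem.List.enumerate (PySem.List.slice row none (some (ncols : Int))) 0).foldl
            (fun s p => if pvCellHit p.2 then PySem.Set.add s p.1 else s) s) s).Nodup := by
  induction sample generalizing s with
  | nil => exact hs
  | cons row rest ih => exact ih _ (pv_nodup_inner _ _ hs)
lemma pv_sample_eq (data : List (List String)) :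
    PySem.List.slice data none (some ((min 5 data.length : Nat) : Int)) = data.take 5 := by
  rw [PySem.List.slice_to_natCast]
  rcases le_total 5 data.length with h | h
  · rw [min_eq_left h]
  · rw [min_eq_right h, List.take_length, List.take_of_length_le h]

lemma pv_sliceB_eq (data : List (List String)) :
    PySem.List.slice data none (some 5) = data.take 5 := by
  have h5 : (5 : Int) = ((5 : Nat) : Int) := rfl
  rw [h5, PySem.List.slice_to_natCast]

lemma pv_main : ∀ (data : List (List String)),
    detect_url_columns_py data = detect_url_columns_py_alt data := by
  intro data
  match data with
  | [] => rfl
  | d0 :: rest =>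
    by_cases hd0 : d0 = []
    · simp [detect_url_columns_py, detect_url_columns_py_alt, hd0]
    · rw [detect_url_columns_py, detect_url_columns_py_alt]
      simp only [hd0, if_false]
      rw [PySem.List.foldl_append_if, List.nil_append, pv_sample_eq]
      set data := d0 :: rest with hdata
      set n := d0.length with hn
      set sample := List.take 5 data with hsample
      have hfilter : (List.range n).filter (pvUrlHitA sample)
          = (List.range n).filter (fun c => pvColB sample c) :=
        List.filter_congr (fun c _ => by rw [pvUrlHitA_eq])
      rw [hfilter]
      -- name B's found set and identify the sorted list
      set found := (PySem.List.slice data none (some 5)).foldl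
          (fun s row =>
            (PySem.List.enumerate (PySem.List.slice row none (some (n : Int))) 0).foldl
              (fun s p => if pvCellHit p.2 then PySem.Set.add s p.1 else s) s)
          PySem.Set.empty with hfound
      have hFnd : found.Nodup := pv_nodup_outer _ _ _ List.nodup_nil
      set T : List Int := List.map (fun c => Int.ofNat c)
          ((List.range n).filter (fun c => pvColB sample c)) with hT
      have hTnd : T.Nodup :=
        ((List.nodup_range).filter _).map (fun a b h => Int.ofNat.inj h)
      have hmem : ∀ x : Int, x ∈ T ↔ x ∈ found := by
        intro x
        rw [hfound, pv_sliceB_eq, pv_mem_outer]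
        simp only [hT, List.mem_map, List.mem_filter, List.mem_range, pvColB,
          List.any_eq_true, Bool.and_eq_true, decide_eq_true_eq, PySem.Set.empty,
          List.not_mem_nil, false_or, ← hsample]
        constructor
        · rintro ⟨c, ⟨hc, row, hrow, hlt, hhit⟩, rfl⟩
          exact ⟨row, hrow, c, hlt, hc, hhit, rfl⟩
        · rintro ⟨row, hrow, k, h1, h2, hhit, rfl⟩
          exact ⟨k, ⟨h2, row, hrow, h1, hhit⟩, rfl⟩
      have hperm : T.Perm found := (List.perm_ext_iff_of_nodup hTnd hFnd).mpr hmem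
      have hpw : T.Pairwise (fun a b : Int => a < b) :=
        (List.pairwise_lt_range.filter _).map _ (fun a b h => Int.ofNat_lt.mpr h)
      have hsorted : PySem.List.sorted found (fun x => x) false = T :=
        PySem.List.sorted_eq_of_perm_of_pairwise_lt found T (fun x => x) hperm hpw
      rw [hsorted, hT, List.map_map]
      rfl

-- ===== VERDICT (by name: the statement is the Claim_ definition above) =====
theorem detect_url_columns_py_spec : Claim_equal_detect_url_columns_py := by
  intro data _
  exact pv_main data
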